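-- pv_equiv track=rewrite | github.com/chen3463/Algorithms | math/Stretch Word.py | stretchWord
-- ===== SOURCE A (Python) =====
-- def stretchWord(S):
--     # write your code here
--     if not S:
--         return 0
--
--     answer = 1
--     index = 0
--     while index < len(S) - 1:
--         current_count = 1
--         while index < len(S) - 1 and S[index] == S[index + 1]:
--             current_count += 1
--             index += 1
--         if current_count > 1:
--             answer *= 2
--
--         index += 1
--
--     return answer
-- ===== SOURCE B (Python) =====
-- def stretchWord(S):
--     # One pass over adjacent pairs: count maximal runs of length > 1, return 2**count.
--     if not S:
--         return 0
--     k = 0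
--     prev_pair = False
--     for a, b in zip(S, S[1:]):
--         pair = (a == b)
--         if pair and not prev_pair:
--             k += 1
--         prev_pair = pair
--     return 2 ** k
-- ===== Notes on version B (the rewrite author's own statement) =====
-- stated objective: simpler
-- what changed: Replaced A's nested index-based while loops with a single pass over adjacent character pairs that counts run starts of length>1 and returns 2**count as a closed form.
import Mathlib
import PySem

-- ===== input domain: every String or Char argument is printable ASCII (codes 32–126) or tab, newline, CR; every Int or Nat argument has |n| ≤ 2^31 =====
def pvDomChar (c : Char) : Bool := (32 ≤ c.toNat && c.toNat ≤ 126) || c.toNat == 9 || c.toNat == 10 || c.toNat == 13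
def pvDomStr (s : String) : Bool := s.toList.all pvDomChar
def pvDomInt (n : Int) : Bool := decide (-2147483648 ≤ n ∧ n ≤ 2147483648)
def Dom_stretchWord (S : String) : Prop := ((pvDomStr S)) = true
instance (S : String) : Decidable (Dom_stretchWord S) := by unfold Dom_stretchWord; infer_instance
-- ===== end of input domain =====

-- B is a simpler single pass over adjacent pairs computing 2^(#runs of length>1); return value only, no side effects involved.

-- ===== PORT A =====
-- inner while loop: advance while the next two chars of the remaining suffix are equal
def innerA : List Char → Int → Int × List Char
  | a :: b :: t, c => if a == b then innerA (b :: t) (c + 1) else (c, a :: b :: t)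
  | r, c => (c, r)

theorem innerA_len : ∀ (l : List Char) (c : Int), (innerA l c).2.length ≤ l.length := by
  intro l
  induction l with
  | nil => intro c; simp [innerA]
  | cons a t ih =>
    intro c
    cases t with
    | nil => simp [innerA]
    | cons b t' =>
      by_cases h : a == b
      · simpa [innerA, h] using Nat.le_succ_of_le (ih (c + 1))
      · simp [innerA, h]

-- outer while loop over the remaining suffix of S
def outerA : List Char → Int → Int
  | a :: b :: t, ans =>
      let r := innerA (a :: b :: t) 1
      outerA r.2.tail (if r.1 > 1 then ans * 2 else ans)
  | _, ans => ans
termination_by l _ => l.length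
decreasing_by
  have h := innerA_len (a :: b :: t) 1
  simp only [List.length_tail]
  simp at h ⊢
  omega

def stretchWord (S : String) : Int :=
  if S.toList = [] then 0 else outerA S.toList 1

-- ===== PORT B =====
-- one step of the pass over a pair (a, b): bump k at the start of a new equal run
def bstep (st : Int × Bool) (p : Char × Char) : Int × Bool :=
  let pair := p.1 == p.2
  (if pair && !st.2 then st.1 + 1 else st.1, pair)

def stretchWord_alt (S : String) : Int :=
  if S.toList = [] then 0
  else
    let l := S.toList
    let k := (List.foldl bstep (0, false) (l.zip (l.drop 1))).1
    2 ^ k.toNat   -- k ≥ 0, so toNat is exact for Python's 2 ** k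

-- ===== PRECONDITION & SPEC =====
def Spec_stretchWord (S : String) (out : Int) : Prop := out = stretchWord_alt S
instance (S : String) (out : Int) : Decidable (Spec_stretchWord S out) := by unfold Spec_stretchWord; infer_instance

-- ===== CLAIM (what is proved, stated in full; the proofs are below) =====
def Claim_equal_stretchWord : Prop := ∀ (S : String), Dom_stretchWord S → Spec_stretchWord S (stretchWord S)

-- ===== LEMMAS AND PROOFS =====

-- pair list of a suffix
def pairsOf (l : List Char) : List (Char × Char) := l.zip (l.drop 1)

theorem pairsOf_cons (a b : Char) (t : List Char) :
    pairsOf (a :: b :: t) = (a, b) :: pairsOf (b :: t) := by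
  simp [pairsOf]

-- count with a shifted start
theorem fold_shift : ∀ (ps : List (Char × Char)) (k : Int) (prev : Bool),
    (List.foldl bstep (k, prev) ps).1 = k + (List.foldl bstep (0, prev) ps).1 := by
  intro ps
  induction ps with
  | nil => intro k prev; simp
  | cons p ps ih =>
    intro k prev
    cases hp : (p.1 == p.2 && !prev)
    · simp only [List.foldl_cons, bstep, hp, Bool.false_eq_true, if_false]
      rw [ih]
    · simp only [List.foldl_cons, bstep, hp, if_true]
      rw [ih (k + 1), ih (0 + 1)]
      omega

theorem fold_nonneg : ∀ (ps : List (Char × Char)) (prev : Bool),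
    0 ≤ (List.foldl bstep (0, prev) ps).1 := by
  intro ps
  induction ps with
  | nil => intro prev; simp
  | cons p ps ih =>
    intro prev
    cases hp : (p.1 == p.2 && !prev)
    · simp only [List.foldl_cons, bstep, hp, Bool.false_eq_true, if_false]
      exact ih _
    · simp only [List.foldl_cons, bstep, hp, if_true]
      rw [fold_shift]
      have := ih (p.1 == p.2)
      omega

theorem innerA_fst_ge : ∀ (l : List Char) (c : Int), c ≤ (innerA l c).1 := by
  intro l
  induction l with
  | nil => intro c; simp [innerA]
  | cons a t ih =>
    intro c
    cases t with
    | nil => simp [innerA]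
    | cons b t' =>
      by_cases h : a == b
      · have := ih (c + 1)
        simp only [innerA, h, if_true]
        omega
      · simp [innerA, h]

-- combined induction: G l (outer loop) and H l (after the inner loop, flag = true)
theorem mainAux : ∀ (n : ℕ) (l : List Char), l.length ≤ n →
    ((∀ ans : Int, outerA l ans =
        ans * 2 ^ ((List.foldl bstep (0, false) (pairsOf l)).1).toNat) ∧
     (∀ (c ans : Int), outerA ((innerA l c).2.tail) ans =
        ans * 2 ^ ((List.foldl bstep (0, true) (pairsOf l)).1).toNat)) := by
  intro n
  induction n with
  | zero =>
    intro l hl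
    have : l = [] := by cases l <;> simp_all
    subst this
    constructor <;> intro c <;> simp [outerA, innerA, pairsOf]
  | succ n ih =>
    intro l hl
    match l with
    | [] => constructor <;> intro c <;> simp [outerA, innerA, pairsOf]
    | [a] => constructor <;> intro c <;> simp [outerA, innerA, pairsOf]
    | a :: b :: t =>
      have hlen : (b :: t).length ≤ n := by simp at hl ⊢; omega
      obtain ⟨ihG, ihH⟩ := ih (b :: t) hlen
      constructor
      · -- G: one outer iteration
        intro ans
        cases h : (a == b)
        · -- no run here: skip one character
          have e1 : innerA (a :: b :: t) 1 = (1, a :: b :: t) := by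
            simp [innerA, h]
          rw [outerA, e1]
          simp only [List.tail_cons]
          rw [if_neg (by omega : ¬(1:Int) > 1), ihG ans, pairsOf_cons, List.foldl_cons]
          have e2 : bstep (0, false) (a, b) = (0, false) := by simp [bstep, h]
          rw [e2]
        · -- run of length ≥ 2: answer *= 2, inner loop continues on b :: t
          have e1 : innerA (a :: b :: t) 1 = innerA (b :: t) (1 + 1) := by
            simp [innerA, h]
          have h2 : (1:Int) < (innerA (b :: t) (1 + 1)).1 := by
            have := innerA_fst_ge (b :: t) (1 + 1); omega
          rw [outerA, e1, if_pos h2, ihH (1 + 1) (ans * 2), pairsOf_cons, List.foldl_cons]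
          have e2 : bstep (0, false) (a, b) = (1, true) := by simp [bstep, h]
          rw [e2, show ((1 : Int), true) = ((0 + 1 : Int), true) by norm_num,
              fold_shift (pairsOf (b :: t)) (0 + 1) true]
          have hnn := fold_nonneg (pairsOf (b :: t)) true
          rw [Int.toNat_add (by omega) hnn, pow_add]
          norm_num
          ring
      · -- H: inner loop step with flag already true
        intro c ans
        cases h : (a == b)
        · have e1 : innerA (a :: b :: t) c = (c, a :: b :: t) := by simp [innerA, h]
          rw [e1]
          simp only [List.tail_cons]
          rw [ihG ans, pairsOf_cons, List.foldl_cons]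
          have e2 : bstep (0, true) (a, b) = (0, false) := by simp [bstep, h]
          rw [e2]
        · have e1 : innerA (a :: b :: t) c = innerA (b :: t) (c + 1) := by simp [innerA, h]
          rw [e1, ihH (c + 1) ans, pairsOf_cons, List.foldl_cons]
          have e2 : bstep (0, true) (a, b) = (0, true) := by simp [bstep, h]
          rw [e2]

-- ===== VERDICT (by name: the statement is the Claim_ definition above) =====
theorem stretchWord_spec : Claim_equal_stretchWord := by
  intro S _
  unfold Spec_stretchWord stretchWord stretchWord_alt
  by_cases h : S.toList = []
  · simp [h]
  · simp only [h, if_false]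
    have := (mainAux S.toList.length S.toList le_rfl).1 1
    rw [this]
    simp [pairsOf]
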